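-- pv_equiv track=rewrite | github.com/yannickloth/W33-Theory | scripts/w33_leech_monster.py | _qpochhammer
-- ===== SOURCE A (Python) =====
-- def _qpochhammer(max_deg: int, step: int = 1) -> list[int]:
--     """Compute (q^step; q^step)_inf = prod_{k>=1} (1 - q^{k*step}) to max_deg."""
--     if step <= 0:
--         raise ValueError("step must be positive")
--     poly = [1] + [0] * max_deg
--     for k in range(1, (max_deg // step) + 1):
--         power = k * step
--         for n in range(max_deg, power - 1, -1):
--             poly[n] -= poly[n - power]
--     return poly
-- ===== SOURCE B (Python) =====
-- def _qpochhammer(max_deg: int, step: int = 1) -> list[int]: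
--     """Compute (q^step; q^step)_inf = prod_{k>=1} (1 - q^{k*step}) to max_deg.
--
--     Only exponents that are multiples of step occur, so solve the step=1
--     problem up to m = max_deg // step and spread the result out."""
--     if step <= 0:
--         raise ValueError("step must be positive")
--     m = max_deg // step
--     base = [1] + [0] * m
--     for k in range(1, m + 1):
--         base = base[:k] + [base[n] - base[n - k] for n in range(k, m + 1)]
--     poly = [1] + [0] * max_deg
--     for j in range(1, m + 1):
--         poly[j * step] = base[j]
--     return poly
-- ===== Notes on version B (the rewrite author's own statement) =====
-- stated objective: alternative
-- what changed: B reduces the problem to the step=1 Euler-product DP on the smaller size m = max_deg//step (rebuilding each coefficient list functionally per factor) and then spreads that result onto the multiples of step, instead of A's in-place downward sieve over all max_deg+1 coefficients for every factor.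
import Mathlib
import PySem

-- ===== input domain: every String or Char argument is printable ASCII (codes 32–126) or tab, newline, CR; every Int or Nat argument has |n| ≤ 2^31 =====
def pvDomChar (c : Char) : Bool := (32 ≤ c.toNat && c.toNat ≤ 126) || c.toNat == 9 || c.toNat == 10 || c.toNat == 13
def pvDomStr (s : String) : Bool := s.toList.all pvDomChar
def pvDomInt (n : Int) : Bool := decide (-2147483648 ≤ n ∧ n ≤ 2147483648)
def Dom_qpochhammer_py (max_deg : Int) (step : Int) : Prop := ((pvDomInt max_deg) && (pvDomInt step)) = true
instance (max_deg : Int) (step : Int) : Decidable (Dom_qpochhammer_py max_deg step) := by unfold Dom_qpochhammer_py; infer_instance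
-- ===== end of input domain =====

-- B solves the step=1 instance on the smaller size max_deg//step (rebuilding the coefficient
-- list functionally per factor) and spreads it onto multiples of step, instead of A's in-place
-- sieve over all max_deg+1 coefficients for every factor; equal return values proved for step ≥ 1.

-- ===== PORT A =====
def qpochhammer_py (max_deg : Int) (step : Int) : List Int :=
  let poly0 : List Int := 1 :: List.replicate max_deg.toNat 0
  (PySem.List.pyRange 1 (PySem.Int.floordiv max_deg step + 1) 1).foldl
    (fun poly k =>
      let power := k * step
      (PySem.List.pyRange max_deg (power - 1) (-1)).foldl
        (fun ps n =>
          PySem.List.pySetD ps n (PySem.List.pyGetD ps n 0 - PySem.List.pyGetD ps (n - power) 0))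
        poly)
    poly0

-- ===== PORT B =====
def qpochhammer_py_alt (max_deg : Int) (step : Int) : List Int :=
  let m := PySem.Int.floordiv max_deg step
  let base0 : List Int := 1 :: List.replicate m.toNat 0
  let base := (PySem.List.pyRange 1 (m + 1) 1).foldl
    (fun b k =>
      PySem.List.slice b none (some k) ++
        (PySem.List.pyRange k (m + 1) 1).map
          (fun n => PySem.List.pyGetD b n 0 - PySem.List.pyGetD b (n - k) 0))
    base0
  let poly0 : List Int := 1 :: List.replicate max_deg.toNat 0
  (PySem.List.pyRange 1 (m + 1) 1).foldl
    (fun p j => PySem.List.pySetD p (j * step) (PySem.List.pyGetD base j 0))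
    poly0

-- ===== PRECONDITION & SPEC =====
-- Pre_ excludes exactly step <= 0, where Python A raises ValueError.
def Pre_qpochhammer_py (max_deg : Int) (step : Int) : Prop := 1 ≤ step
instance (max_deg : Int) (step : Int) : Decidable (Pre_qpochhammer_py max_deg step) := by unfold Pre_qpochhammer_py; infer_instance
def pvWitness_qpochhammer_py : Int × Int := (6, 2)
def Spec_qpochhammer_py (max_deg : Int) (step : Int) (out : List Int) : Prop := out = qpochhammer_py_alt max_deg step
instance (max_deg : Int) (step : Int) (out : List Int) : Decidable (Spec_qpochhammer_py max_deg step out) := by unfold Spec_qpochhammer_py; infer_instance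

-- ===== CLAIM (what is proved, stated in full; the proofs are below) =====
def Claim_equal_qpochhammer_py : Prop := ∀ (max_deg : Int) (step : Int), Dom_qpochhammer_py max_deg step → Pre_qpochhammer_py max_deg step → Spec_qpochhammer_py max_deg step (qpochhammer_py max_deg step)

-- ===== LEMMAS AND PROOFS =====
theorem getD_set_eq_ite (l : List Int) (n i : Nat) (v d : Int) :
    (l.set n v).getD i d = if i = n ∧ n < l.length then v else l.getD i d := by
  simp only [List.getD_eq_getElem?_getD, List.getElem?_set]
  split_ifs with h1 h2 h3 <;> simp_all

def innerF (p : Int) : List Int → Int → List Int := fun ps n =>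
  PySem.List.pySetD ps n (PySem.List.pyGetD ps n 0 - PySem.List.pyGetD ps (n - p) 0)

theorem pyGetD_nonneg_eq_getD (ps : List Int) (i : Int) (h : 0 ≤ i) (d : Int) :
    PySem.List.pyGetD ps i d = ps.getD i.toNat d := by
  obtain ⟨n, rfl⟩ : ∃ n : Nat, i = (n : Int) := ⟨i.toNat, (Int.toNat_of_nonneg h).symm⟩
  simp

theorem innerA_closed (p : Int) (hp : 1 ≤ p) (hi : Int) (ps : List Int) :
    (((PySem.List.pyRange hi (p - 1) (-1)).foldl (innerF p) ps).length = ps.length) ∧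
    (∀ i : Nat,
      ((PySem.List.pyRange hi (p - 1) (-1)).foldl (innerF p) ps).getD i 0 =
        if p ≤ (i : Int) ∧ (i : Int) ≤ hi ∧ i < ps.length
        then ps.getD i 0 - ps.getD ((i : Int) - p).toNat 0
        else ps.getD i 0) := by
  by_cases h : hi ≤ p - 1
  · rw [PySem.List.pyRange_neg_one_eq_nil h]
    refine ⟨by simp, fun i => ?_⟩
    simp only [List.foldl_nil]
    rw [if_neg (by omega)]
  · rw [PySem.List.pyRange_neg_one_cons (by omega)]
    simp only [List.foldl_cons]
    have hhi : 0 ≤ hi := by omega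
    have hset : innerF p ps hi = ps.set hi.toNat (ps.getD hi.toNat 0 - ps.getD (hi - p).toNat 0) := by
      simp only [innerF, PySem.List.pySetD_of_nonneg ps _ hhi,
        pyGetD_nonneg_eq_getD ps hi hhi, pyGetD_nonneg_eq_getD ps (hi - p) (by omega)]
    have IH := innerA_closed p hp (hi - 1) (innerF p ps hi)
    have hlen : (innerF p ps hi).length = ps.length := by rw [hset]; simp
    refine ⟨IH.1.trans hlen, fun i => ?_⟩
    rw [IH.2 i, hlen]
    by_cases hc : p ≤ (i : Int) ∧ (i : Int) ≤ hi - 1 ∧ i < ps.length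
    · rw [if_pos hc, if_pos (by omega)]
      rw [hset, getD_set_eq_ite, getD_set_eq_ite]
      rw [if_neg (by omega), if_neg (by omega)]
    · rw [if_neg hc]
      by_cases he : (i : Int) = hi ∧ i < ps.length
      · have hieq : i = hi.toNat := by omega
        rw [if_pos (by omega), hset, getD_set_eq_ite, if_pos (by constructor <;> omega)]
        congr 1
        · rw [hieq]
        · congr 1; omega
      · rw [if_neg (by omega), hset, getD_set_eq_ite, if_neg (by omega)]
  termination_by (hi - p + 1).toNat
  decreasing_by omega

def stepBF (m : Int) : List Int → Int → List Int := fun b k =>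
  PySem.List.slice b none (some k) ++
    (PySem.List.pyRange k (m + 1) 1).map
      (fun n => PySem.List.pyGetD b n 0 - PySem.List.pyGetD b (n - k) 0)

theorem stepB_closed (m : Int) (k : Int) (hk : 1 ≤ k) (hkm : k ≤ m) (b : List Int)
    (hb : b.length = m.toNat + 1) :
    (stepBF m b k).length = m.toNat + 1 ∧
    ∀ j : Nat, (stepBF m b k).getD j 0 =
      if k ≤ (j : Int) ∧ (j : Int) ≤ m then b.getD j 0 - b.getD ((j : Int) - k).toNat 0
      else b.getD j 0 := by
  have hk0 : (0:Int) ≤ k := by omega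
  have hslice : PySem.List.slice b none (some k) = b.take k.toNat := PySem.List.slice_to b hk0
  have hlt : (b.take k.toNat).length = k.toNat := by
    simp [hb]; omega
  have hmaplen : ((PySem.List.pyRange k (m + 1) 1).map
      (fun n => PySem.List.pyGetD b n 0 - PySem.List.pyGetD b (n - k) 0)).length
      = (m + 1 - k).toNat := by
    simp [PySem.List.length_pyRange_one]
  have hlen : (stepBF m b k).length = m.toNat + 1 := by
    simp only [stepBF, hslice, List.length_append, hlt, hmaplen]; omega
  refine ⟨hlen, fun j => ?_⟩
  by_cases hj1 : j < k.toNat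
  · rw [if_neg (by omega)]
    simp only [stepBF, hslice, List.getD_eq_getElem?_getD,
      List.getElem?_append_left (by omega : j < (b.take k.toNat).length), List.getElem?_take]
    rw [if_pos hj1]
  · by_cases hj2 : (j : Int) ≤ m
    · rw [if_pos ⟨by omega, hj2⟩]
      have hjlen : j - k.toNat < (m + 1 - k).toNat := by omega
      simp only [stepBF, hslice, List.getD_eq_getElem?_getD,
        List.getElem?_append_right (by omega : (b.take k.toNat).length ≤ j), hlt]
      rw [List.getElem?_map, PySem.List.getElem?_pyRange_one,
        if_pos (by omega : j - k.toNat < (m + 1 - k).toNat)]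
      simp only [Option.map_some, Option.getD_some]
      have hn : k + ((j - k.toNat : Nat) : Int) = (j : Int) := by omega
      rw [hn, pyGetD_nonneg_eq_getD b _ (by omega), pyGetD_nonneg_eq_getD b _ (by omega)]
      simp
    · rw [if_neg (by omega)]
      have l1 : m.toNat + 1 ≤ j := by omega
      have : (stepBF m b k).getD j 0 = 0 := List.getD_eq_default _ _ (by omega)
      rw [this, List.getD_eq_default _ _ (by omega)]

def fillF (s : Int) (base : List Int) : List Int → Int → List Int := fun p j =>
  PySem.List.pySetD p (j * s) (PySem.List.pyGetD base j 0)

theorem fill_closed (s : Int) (hs : 1 ≤ s) (base : List Int) (m : Int) (poly : List Int) :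
    (((PySem.List.pyRange 1 (m + 1) 1).foldl (fillF s base) poly).length = poly.length) ∧
    (∀ i : Nat,
      ((PySem.List.pyRange 1 (m + 1) 1).foldl (fillF s base) poly).getD i 0 =
        if (s ∣ (i : Int)) ∧ s ≤ (i : Int) ∧ (i : Int) ≤ m * s ∧ i < poly.length
        then base.getD (((i : Int) / s)).toNat 0
        else poly.getD i 0) := by
  by_cases hm : m ≤ 0
  · rw [PySem.List.pyRange_one_eq_nil (by omega)]
    refine ⟨by simp, fun i => ?_⟩
    simp only [List.foldl_nil]
    rw [if_neg (by rintro ⟨-, h2, h3, -⟩; nlinarith)]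
  · have hm1 : 1 ≤ m := by omega
    rw [show m + 1 = (m - 1) + 1 + 1 by ring,
      PySem.List.pyRange_one_succ_right (by omega : (1:Int) ≤ (m-1) + 1),
      List.foldl_append]
    obtain ⟨IH1, IH2⟩ := fill_closed s hs base (m - 1) poly
    simp only [List.foldl_cons, List.foldl_nil]
    set prev := (PySem.List.pyRange 1 (m - 1 + 1) 1).foldl (fillF s base) poly with hprev
    have hms : (0:Int) ≤ m * s := by positivity
    have hstep : fillF s base prev (m - 1 + 1) =
        prev.set (m * s).toNat (base.getD m.toNat 0) := by
      simp only [fillF]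
      rw [show m - 1 + 1 = m by ring, PySem.List.pySetD_of_nonneg prev _ hms,
        pyGetD_nonneg_eq_getD base m (by omega)]
    rw [hstep]
    refine ⟨by simp [IH1], fun i => ?_⟩
    rw [getD_set_eq_ite, IH1]
    by_cases hcase : i = (m * s).toNat ∧ (m * s).toNat < poly.length
    · rw [if_pos hcase]
      have hi : (i : Int) = m * s := by omega
      rw [if_pos ⟨⟨m, by rw [hi]; ring⟩, by nlinarith, by omega, by omega⟩]
      rw [hi, Int.mul_ediv_cancel m (by omega)]
    · rw [if_neg hcase, IH2 i]
      by_cases hc1 : (s ∣ (i:Int)) ∧ s ≤ (i:Int) ∧ (i:Int) ≤ (m - 1) * s ∧ i < poly.length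
      · rw [if_pos hc1, if_pos ⟨hc1.1, hc1.2.1, by nlinarith [hc1.2.2.1], hc1.2.2.2⟩]
      · have hnot : ¬((s ∣ (i:Int)) ∧ s ≤ (i:Int) ∧ (i:Int) ≤ m * s ∧ i < poly.length) := by
          rintro ⟨⟨q, hq⟩, h2, h3, h4⟩
          apply hc1
          refine ⟨⟨q, hq⟩, h2, ?_, h4⟩
          -- i ≠ m*s (from hcase with h4), so q ≤ m - 1
          have hqm : q ≤ m := by nlinarith
          have hne : (i : Int) ≠ m * s := by omega
          have hqm' : q ≤ m - 1 := by
            rcases lt_or_eq_of_le hqm with h | h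
            · omega
            · exact absurd (show (i:Int) = m * s by rw [hq, h]; ring) hne
          nlinarith
        rw [if_neg hnot, if_neg hc1]
  termination_by m.toNat
  decreasing_by omega

def RelAB (D s : Nat) (A b : List Int) : Prop :=
  A.length = D + 1 ∧ b.length = D / s + 1 ∧ b.getD 0 0 = 1 ∧
  ∀ i : Nat, i ≤ D → A.getD i 0 = if i % s = 0 then b.getD (i / s) 0 else 0

theorem step_pres (D s : Nat) (hs : 1 ≤ s) (k : Nat) (hk : 1 ≤ k) (hkm : k ≤ D / s)
    (A b : List Int) (h : RelAB D s A b) :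
    RelAB D s
      ((PySem.List.pyRange (D : Int) (((k : Nat) : Int) * ((s : Nat) : Int) - 1) (-1)).foldl
        (innerF (((k : Nat) : Int) * ((s : Nat) : Int))) A)
      (stepBF (((D / s : Nat) : Int)) b ((k : Nat) : Int)) := by
  obtain ⟨hA, hb, hb0, hrel⟩ := h
  have hp : (1:Int) ≤ ((k:Int) * (s:Int)) := by
    have : (1:Nat) ≤ k * s := Nat.one_le_iff_ne_zero.mpr (by positivity)
    exact_mod_cast this
  obtain ⟨hAlen, hAget⟩ := innerA_closed ((k:Int) * (s:Int)) hp (D : Int) A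
  obtain ⟨hBlen, hBget⟩ := stepB_closed ((D / s : Nat) : Int) (k : Int)
    (by exact_mod_cast hk) (by exact_mod_cast hkm) b (by simpa using hb)
  have hks : ((k:Int) * (s:Int)) = ((k * s : Nat) : Int) := by push_cast; ring
  refine ⟨hAlen.trans hA, by simpa using hBlen, ?_, ?_⟩
  · rw [hBget 0, if_neg (by omega)]; exact hb0
  · intro i hi
    rw [hAget i, hA]
    have hsub : ((i : Int) - (k:Int) * (s:Int)).toNat = i - k * s := by omega
    by_cases hcond : (k * s : Nat) ≤ i
    · rw [if_pos ⟨by omega, by omega, by omega⟩, hsub]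
      have hmod : (i - k * s) % s = i % s := by
        conv_rhs => rw [← Nat.sub_add_cancel hcond]
        rw [Nat.add_mul_mod_self_right]
      by_cases hm : i % s = 0
      · -- i = (i/s) * s, divisible case
        have hj : i % s = 0 := hm
        set j := i / s with hjdef
        have hjs : j * s = i := Nat.div_mul_cancel (Nat.dvd_of_mod_eq_zero hm)
        have hkj : k ≤ j := by
          rw [hjdef]; exact (Nat.le_div_iff_mul_le (by omega)).mpr hcond
        have hdiv : (i - k * s) / s = j - k := by
          rw [show i - k * s = i - s * k by ring_nf, Nat.sub_mul_div, hjdef]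
        have htn : (((j:Nat):Int) - ((k:Nat):Int)).toNat = j - k := by omega
        rw [if_pos hm, hrel i hi, hrel (i - k * s) (by omega), if_pos hm,
          if_pos (hmod.trans hm), hdiv, hBget j,
          if_pos ⟨by exact_mod_cast hkj, by exact_mod_cast Nat.div_le_div_right hi⟩, htn]
      · rw [if_neg hm, hrel i hi, hrel (i - k*s) (by omega), if_neg hm, if_neg (hmod.trans_ne hm)]
        ring
    · rw [if_neg (by omega)]
      by_cases hm : i % s = 0
      · set j := i / s with hjdef
        have hjs : j * s = i := Nat.div_mul_cancel (Nat.dvd_of_mod_eq_zero hm)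
        have hkj : ¬ (k ≤ j) := by
          intro hle
          exact hcond (by calc k * s ≤ j * s := by exact Nat.mul_le_mul_right s hle
                            _ = i := hjs)
        rw [hrel i hi, if_pos hm, if_pos hm, hBget j,
          if_neg (fun hc => hkj (by exact_mod_cast hc.1))]
      · rw [hrel i hi, if_neg hm, if_neg hm]

theorem outer_ind (D s : Nat) (hs : 1 ≤ s) (t : Nat) (ht : t ≤ D / s) :
    RelAB D s
      ((PySem.List.pyRange 1 ((t : Int) + 1) 1).foldl
        (fun poly k =>
          (PySem.List.pyRange (D : Int) (k * (s : Int) - 1) (-1)).foldl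
            (innerF (k * (s : Int))) poly)
        (1 :: List.replicate D 0))
      ((PySem.List.pyRange 1 ((t : Int) + 1) 1).foldl (stepBF ((D / s : Nat) : Int))
        (1 :: List.replicate (D / s) 0)) := by
  induction t with
  | zero =>
    rw [PySem.List.pyRange_one_eq_nil (by norm_num)]
    simp only [List.foldl_nil]
    refine ⟨by simp, by simp, by simp, fun i hi => ?_⟩
    match i with
    | 0 => simp
    | (n+1) =>
      have hrep : ∀ (Dn : Nat) (j : Nat), (List.replicate Dn (0:Int)).getD j 0 = 0 := by
        intro Dn j
        simp only [List.getD_eq_getElem?_getD, List.getElem?_replicate]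
        split <;> simp
      simp only [List.getD_cons_succ, hrep]
      by_cases hm : (n+1) % s = 0
      · rw [if_pos hm]
        have : s ≤ n + 1 := Nat.le_of_dvd (by omega) (Nat.dvd_of_mod_eq_zero hm)
        have h1 : 1 ≤ (n+1)/s := (Nat.le_div_iff_mul_le (by omega)).mpr (by omega)
        rcases Nat.exists_eq_add_of_le h1 with ⟨c, hc⟩
        rw [hc]
        simp only [Nat.add_comm 1 c, List.getD_cons_succ, hrep]
      · rw [if_neg hm]
  | succ t IH =>
    have ht' : t ≤ D / s := by omega
    have hcast : ((t + 1 : Nat) : Int) + 1 = ((t : Int) + 1) + 1 := by push_cast; ring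
    rw [hcast, PySem.List.pyRange_one_succ_right (by omega : (1:Int) ≤ (t : Int) + 1),
      List.foldl_append, List.foldl_append]
    simp only [List.foldl_cons, List.foldl_nil]
    have hstep := step_pres D s hs (t+1) (by omega) (by omega) _ _ (IH ht')
    have hcast2 : ((t : Int) + 1) = (((t + 1 : Nat)) : Int) := by push_cast; ring
    rw [hcast2]
    exact hstep

theorem main_eq (max_deg step : Int) (hpre : 1 ≤ step) :
    qpochhammer_py max_deg step = qpochhammer_py_alt max_deg step := by
  by_cases hneg : max_deg < 0
  · have hm : PySem.Int.floordiv max_deg step < 0 := by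
      rw [PySem.Int.floordiv_lt_iff_lt_mul (by omega)]
      omega
    have h1 : PySem.List.pyRange 1 (PySem.Int.floordiv max_deg step + 1) 1 = [] :=
      PySem.List.pyRange_one_eq_nil (by omega)
    have h2 : max_deg.toNat = 0 := by omega
    simp [qpochhammer_py, qpochhammer_py_alt, h1, h2]
  · have h0 : 0 ≤ max_deg := by omega
    obtain ⟨D, rfl⟩ : ∃ Dn : Nat, max_deg = (Dn : Int) := ⟨max_deg.toNat, (Int.toNat_of_nonneg h0).symm⟩
    obtain ⟨s, rfl⟩ : ∃ sn : Nat, step = (sn : Int) := ⟨step.toNat, (Int.toNat_of_nonneg (by omega)).symm⟩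
    have hsp : 1 ≤ s := by exact_mod_cast hpre
    have hfd : PySem.Int.floordiv (D : Int) (s : Int) = ((D / s : Nat) : Int) :=
      PySem.Int.floordiv_natCast D s
    obtain ⟨hAlen, hblen, hb0, hrel⟩ := outer_ind D s hsp (D / s) le_rfl
    set bfinal := (PySem.List.pyRange 1 (((D / s : Nat) : Int) + 1) 1).foldl
      (stepBF ((D / s : Nat) : Int)) (1 :: List.replicate (D / s) 0) with hbf
    set Afinal := (PySem.List.pyRange 1 (((D / s : Nat) : Int) + 1) 1).foldl
      (fun poly k =>
        (PySem.List.pyRange (D : Int) (k * (s : Int) - 1) (-1)).foldl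
          (innerF (k * (s : Int))) poly)
      (1 :: List.replicate D 0) with hA
    obtain ⟨hFlen, hFget⟩ := fill_closed (s : Int) (by exact_mod_cast hsp) bfinal
      ((D / s : Nat) : Int) (1 :: List.replicate D 0)
    set Bout := (PySem.List.pyRange 1 (((D / s : Nat) : Int) + 1) 1).foldl
      (fillF (s : Int) bfinal) (1 :: List.replicate D 0) with hB
    have hrep : ∀ (Dn : Nat) (j : Nat), (List.replicate Dn (0:Int)).getD j 0 = 0 := by
      intro Dn j
      simp only [List.getD_eq_getElem?_getD, List.getElem?_replicate]
      split <;> simp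
    have hmain : Afinal = Bout := by
      have hlenB : Bout.length = D + 1 := by rw [hB, hFlen]; simp
      have hgetD : ∀ i : Nat, i ≤ D → Afinal.getD i 0 = Bout.getD i 0 := by
        intro i hi
        rw [hrel i hi, hFget i]
        match i with
        | 0 =>
          rw [if_pos (Nat.zero_mod s), if_neg (by omega)]
          simpa using hb0
        | (n+1) =>
          by_cases hm : (n+1) % s = 0
          · have hdvd : s ∣ (n+1) := Nat.dvd_of_mod_eq_zero hm
            have hsle : s ≤ n+1 := Nat.le_of_dvd (by omega) hdvd
            have hj : (n+1)/s ≤ D/s := Nat.div_le_div_right hi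
            have hub : (n+1) ≤ (D/s) * s := by
              calc (n+1) = ((n+1)/s) * s := (Nat.div_mul_cancel hdvd).symm
                _ ≤ (D/s) * s := Nat.mul_le_mul_right s hj
            rw [if_pos hm, if_pos ⟨Int.natCast_dvd_natCast.mpr hdvd, by exact_mod_cast hsle,
              by exact_mod_cast hub, by simp only [List.length_cons, List.length_replicate]; omega⟩]
            rw [← Int.natCast_div, Int.toNat_natCast]
          · have hndvd : ¬ ((s:Int) ∣ ((n+1 : Nat) : Int)) := by
              rw [Int.natCast_dvd_natCast]
              exact fun hd => hm (Nat.mod_eq_zero_of_dvd hd)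
            rw [if_neg hm, if_neg (fun hc => hndvd hc.1)]
            simp only [List.getD_cons_succ, hrep]
      apply List.ext_getElem (by rw [hAlen, hlenB])
      intro i h1 h2
      rw [← List.getD_eq_getElem Afinal 0 h1, ← List.getD_eq_getElem Bout 0 h2]
      exact hgetD i (by omega)
    -- transfer to the ports
    show qpochhammer_py (D : Int) (s : Int) = qpochhammer_py_alt (D : Int) (s : Int)
    simp only [qpochhammer_py, qpochhammer_py_alt, hfd, Int.toNat_natCast]
    exact hmain

-- ===== VERDICT (by name: the statement is the Claim_ definition above) =====
theorem qpochhammer_py_spec : Claim_equal_qpochhammer_py := by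
  intro max_deg step _ hpre
  exact main_eq max_deg step hpre
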